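-- pv_equiv track=rewrite | github.com/FiskAxel/advent_of_code_2016 | day14.py | checkFiveplePart2
-- ===== SOURCE A (Python) =====
-- def checkFiveplePart2(triple, hashes):
-- 	c = triple[0]
-- 	for i in hashes:
-- 		if i == hashes[0]:
-- 			continue
-- 		streak = 0
-- 		for j in i:
-- 			if j == c:
-- 				streak += 1
-- 			else:
-- 				streak = 0
-- 				continue
-- 			if streak == 5:
-- 				return True
-- 	return False
-- ===== SOURCE B (Python) =====
-- def checkFiveplePart2(triple, hashes):
--     target = triple[0] * 5
--     return any(target in i for i in hashes if i != hashes[0])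
-- ===== Notes on version B (the rewrite author's own statement) =====
-- stated objective: idiomatic
-- what changed: Replaces the manual per-character streak counter and early-return loops with a substring membership test (triple[0]*5 in hash) inside a single any() over the non-first hashes.
-- outside the precondition, e.g. on checkFiveplePart2('', ['aaaaa']): A raises IndexError, B raises IndexError
import Mathlib
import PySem

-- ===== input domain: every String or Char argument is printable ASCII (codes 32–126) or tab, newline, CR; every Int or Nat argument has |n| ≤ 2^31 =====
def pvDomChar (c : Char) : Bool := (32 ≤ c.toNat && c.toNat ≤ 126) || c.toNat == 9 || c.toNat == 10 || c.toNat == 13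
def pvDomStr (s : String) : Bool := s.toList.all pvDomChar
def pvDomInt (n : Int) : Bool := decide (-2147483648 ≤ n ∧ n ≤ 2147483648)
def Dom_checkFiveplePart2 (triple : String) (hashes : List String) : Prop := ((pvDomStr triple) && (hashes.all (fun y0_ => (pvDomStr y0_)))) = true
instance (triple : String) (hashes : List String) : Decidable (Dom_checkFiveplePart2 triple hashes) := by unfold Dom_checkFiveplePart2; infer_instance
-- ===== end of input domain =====

-- B replaces A's manual per-character streak counter with a single any() using a
-- substring membership test (triple[0]*5 in hash); same cost, more idiomatic.
-- Both A and B raise IndexError on an empty `triple` (triple[0]); Pre_ excludes exactly that.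

-- ===== PORT A =====
-- inner for-loop over the characters of one hash, with the streak counter and early return
def pvAInner (c : Char) : List Char → Int → Bool
  | [], _ => false
  | j :: rest, streak =>
    if j = c then
      (if streak + 1 = 5 then true else pvAInner c rest (streak + 1))
    else
      pvAInner c rest 0

-- outer for-loop over the hashes, skipping any hash equal to hashes[0]
def pvAOuter (c : Char) (h0 : String) : List String → Bool
  | [] => false
  | i :: rest =>
    if i = h0 then pvAOuter c h0 rest
    else if pvAInner c i.toList 0 then true else pvAOuter c h0 rest

def checkFiveplePart2 (triple : String) (hashes : List String) : Bool :=
  match PySem.Str.pyGet? triple 0 with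
  | none => false       -- triple[0] raises IndexError: excluded by Pre_
  | some c =>
    match hashes with
    | [] => false       -- empty loop: hashes[0] is never evaluated, returns False
    | h0 :: _ => pvAOuter c h0 hashes

-- ===== PORT B =====
def checkFiveplePart2_alt (triple : String) (hashes : List String) : Bool :=
  match PySem.Str.pyGet? triple 0 with
  | none => false       -- triple[0] raises IndexError: excluded by Pre_
  | some c =>
    match hashes with
    | [] => false       -- empty generator: hashes[0] never evaluated, any() is False
    | h0 :: _ =>
      let target := String.ofList (List.replicate 5 c)   -- triple[0] * 5
      hashes.any (fun i => i ≠ h0 && PySem.Str.isIn target i)   -- any(target in i for i in hashes if i != hashes[0])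

-- ===== PRECONDITION & SPEC =====
-- Pre_ excludes only triple = "", where both A and B raise IndexError on triple[0].
def Pre_checkFiveplePart2 (triple : String) (hashes : List String) : Prop := triple ≠ ""
instance (triple : String) (hashes : List String) : Decidable (Pre_checkFiveplePart2 triple hashes) := by unfold Pre_checkFiveplePart2; infer_instance
def pvWitness_checkFiveplePart2 : String × List String := ("a", ["bbbbb", "aaaaa"])
def Spec_checkFiveplePart2 (triple : String) (hashes : List String) (out : Bool) : Prop := out = checkFiveplePart2_alt triple hashes
instance (triple : String) (hashes : List String) (out : Bool) : Decidable (Spec_checkFiveplePart2 triple hashes out) := by unfold Spec_checkFiveplePart2; infer_instance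

-- ===== CLAIM (what is proved, stated in full; the proofs are below) =====
def Claim_equal_checkFiveplePart2 : Prop := ∀ (triple : String) (hashes : List String), Dom_checkFiveplePart2 triple hashes → Pre_checkFiveplePart2 triple hashes → Spec_checkFiveplePart2 triple hashes (checkFiveplePart2 triple hashes)

-- ===== LEMMAS AND PROOFS =====

-- a shorter all-c run is a prefix whenever a longer one is
lemma pvRepPrefixMono {c : Char} {k m : Nat} {l : List Char} (hkm : k ≤ m)
    (h : List.replicate m c <+: l) : List.replicate k c <+: l :=
  List.IsPrefix.trans ⟨List.replicate (m - k) c, by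
    rw [← List.replicate_add]; congr 1; omega⟩ h

-- no all-c run is a prefix of a string starting with a character ≠ c
lemma pvRepNotPrefixCons {c j : Char} {rest : List Char} (hjc : j ≠ c) :
    ∀ (n : Nat), 0 < n → ¬ (List.replicate n c <+: j :: rest) := by
  intro n hn h
  cases n with
  | zero => omega
  | succ m =>
    rw [List.replicate_succ, List.cons_prefix_cons] at h
    exact hjc h.1.symm

-- A's streak loop finds a 5-run iff the string either starts with the remaining
-- (5 - streak) copies of c, or contains a full 5-run further in
lemma pvAInner_iff (c : Char) : ∀ (l : List Char) (s : Int), 0 ≤ s → s ≤ 4 →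
    (pvAInner c l s = true ↔
      (List.replicate (5 - s).toNat c <+: l ∨ List.replicate 5 c <:+: l)) := by
  intro l
  induction l with
  | nil =>
    intro s hs0 hs4
    simp only [pvAInner]
    constructor
    · intro h; cases h
    · rintro (h | h)
      · have h2 : (5 - s).toNat = 0 := by
          simpa using List.prefix_nil.mp h
        omega
      · have := List.infix_nil.mp h
        simp at this
  | cons j rest ih =>
    intro s hs0 hs4
    have h5s : (5 - s).toNat = (4 - s).toNat + 1 := by omega
    by_cases hjc : j = c
    · subst hjc
      have hstep : pvAInner j (j :: rest) s =
          if s + 1 = 5 then true else pvAInner j rest (s + 1) := by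
        simp [pvAInner]
      rw [hstep]
      by_cases hs5 : s + 1 = 5
      · have hs : s = 4 := by omega
        subst hs
        rw [if_pos hs5]
        refine iff_of_true rfl (Or.inl ?_)
        have h1 : ((5 : Int) - 4).toNat = 1 := by norm_num
        rw [h1, List.replicate_one]
        exact ⟨rest, rfl⟩
      · have key := ih (s + 1) (by omega) (by omega)
        have h45 : (5 - (s + 1)).toNat = (4 - s).toNat := by omega
        rw [h45] at key
        rw [if_neg hs5, key]
        have hpA : List.replicate (5 - s).toNat j <+: j :: rest ↔
            List.replicate (4 - s).toNat j <+: rest := by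
          rw [h5s, List.replicate_succ, List.cons_prefix_cons]
          simp
        have hp5 : List.replicate 5 j <+: j :: rest ↔ List.replicate 4 j <+: rest := by
          rw [show (5 : Nat) = 4 + 1 from rfl, List.replicate_succ, List.cons_prefix_cons]
          simp
        rw [hpA, List.infix_cons_iff, hp5]
        constructor
        · rintro (h | h)
          · exact Or.inl h
          · exact Or.inr (Or.inr h)
        · rintro (h | h | h)
          · exact Or.inl h
          · exact Or.inl (pvRepPrefixMono (by omega) h)
          · exact Or.inr h
    · have key := ih 0 (by omega) (by omega)
      norm_num at key
      have hstep : pvAInner c (j :: rest) s = pvAInner c rest 0 := by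
        simp [pvAInner, hjc]
      rw [hstep, key]
      constructor
      · rintro (h | h)
        · exact Or.inr (List.infix_cons h.isInfix)
        · exact Or.inr (List.infix_cons h)
      · rintro (h | h)
        · exact absurd h (pvRepNotPrefixCons hjc _ (by omega))
        · rw [List.infix_cons_iff] at h
          rcases h with h | h
          · exact absurd h (pvRepNotPrefixCons hjc 5 (by omega))
          · exact Or.inr h

-- the streak loop from 0 is exactly substring search for c⁵
lemma pvAInner_eq_isIn (c : Char) (i : String) :
    pvAInner c i.toList 0 = PySem.Str.isIn (String.ofList (List.replicate 5 c)) i := by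
  have h := pvAInner_iff c i.toList 0 (by omega) (by omega)
  norm_num at h
  rw [PySem.Str.isIn_eq, String.toList_ofList]
  cases hb : PySem.Chars.isIn (List.replicate 5 c) i.toList with
  | true =>
    exact h.mpr (Or.inr ((PySem.Chars.isIn_iff_infix _ _).mp hb))
  | false =>
    rw [← Bool.not_eq_true, h]
    have hni : ¬ (List.replicate 5 c <:+: i.toList) := by
      intro hcon
      rw [← PySem.Chars.isIn_iff_infix, hb] at hcon
      cases hcon
    rintro (h1 | h1)
    · exact hni h1.isInfix
    · exact hni h1

-- the outer loops agree hash by hash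
lemma pvAOuter_eq_any (c : Char) (h0 : String) (hs : List String) :
    pvAOuter c h0 hs =
      hs.any (fun i => i ≠ h0 && PySem.Str.isIn (String.ofList (List.replicate 5 c)) i) := by
  induction hs with
  | nil => rfl
  | cons i rest ih =>
    simp only [pvAOuter, List.any_cons]
    by_cases hih0 : i = h0
    · simp [hih0, ih]
    · rw [if_neg hih0, pvAInner_eq_isIn]
      cases hin : PySem.Str.isIn (String.ofList (List.replicate 5 c)) i with
      | true => simp [hih0]
      | false => simp [hih0, ih]

-- ===== VERDICT (by name: the statement is the Claim_ definition above) =====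
theorem checkFiveplePart2_spec : Claim_equal_checkFiveplePart2 := by
  intro triple hashes _ _
  unfold Spec_checkFiveplePart2 checkFiveplePart2 checkFiveplePart2_alt
  cases h : PySem.Str.pyGet? triple 0 with
  | none => rfl
  | some c =>
    cases hashes with
    | nil => rfl
    | cons h0 rest => exact pvAOuter_eq_any c h0 (h0 :: rest)
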